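-- pv_equiv track=rewrite | github.com/jpaeng/PE | common.py | is_sub_permutation
-- ===== SOURCE A (Python) =====
-- def is_sub_permutation(str1, str2):
--     """Return whether the characters of str1 is a substring permutation of str2."""
--     result = True
--     if len(str1) > len(str2):
--         result = False
--     else:
--         for c in str1:
--             if str1.count(c) > str2.count(c):
--                 result = False
--                 break
--     return result
-- ===== SOURCE B (Python) =====
-- def is_sub_permutation(str1, str2):
--     """Return whether the characters of str1 is a substring permutation of str2."""
--     s1 = sorted(str1)
--     s2 = sorted(str2)
--     j = 0
--     n = len(s2)
--     for c in s1:
--         while j < n and s2[j] != c: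
--             j += 1
--         if j == n:
--             return False
--         j += 1
--     return True
-- ===== Notes on version B (the rewrite author's own statement) =====
-- stated objective: faster
-- what changed: Replaces A's per-character str.count comparisons (a quadratic scan-within-scan) by sorting both strings once and checking containment with a single two-pointer merge scan over the sorted sequences.
import Mathlib
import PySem

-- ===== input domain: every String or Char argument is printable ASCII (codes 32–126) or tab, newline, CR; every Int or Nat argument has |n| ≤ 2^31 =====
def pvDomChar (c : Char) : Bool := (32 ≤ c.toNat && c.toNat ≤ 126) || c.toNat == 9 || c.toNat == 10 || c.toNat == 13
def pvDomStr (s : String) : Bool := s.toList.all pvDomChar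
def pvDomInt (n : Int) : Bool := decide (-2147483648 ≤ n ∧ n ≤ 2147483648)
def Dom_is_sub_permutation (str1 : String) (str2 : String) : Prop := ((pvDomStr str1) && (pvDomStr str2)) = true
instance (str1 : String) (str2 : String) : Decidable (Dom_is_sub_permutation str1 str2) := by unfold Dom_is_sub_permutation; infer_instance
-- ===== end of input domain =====

-- B replaces A's quadratic per-character count comparisons by sorting both strings and
-- checking str1's sorted characters against str2's by a single two-pointer merge scan (alternative decomposition).

-- ===== PORT A =====
-- the `for c in str1: if str1.count(c) > str2.count(c): result = False; break` loop;
-- str.count on a single character equals List.count of that character (exact here).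
def pyALoop (l1 l2 : List Char) : List Char → Bool
  | [] => true
  | c :: cs => if l1.count c > l2.count c then false else pyALoop l1 l2 cs

def is_sub_permutation (str1 : String) (str2 : String) : Bool :=
  if str1.toList.length > str2.toList.length then false
  else pyALoop str1.toList str2.toList str1.toList

-- ===== PORT B =====
-- the `for c in s1: advance j through s2 until s2[j] == c` two-pointer merge scan of Source B
def mergeLoop : List Char → List Char → Bool
  | [], _ => true
  | _ :: _, [] => false
  | c :: cs, d :: ds => if d = c then mergeLoop cs ds else mergeLoop (c :: cs) ds

def is_sub_permutation_alt (str1 : String) (str2 : String) : Bool :=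
  mergeLoop (PySem.List.sorted str1.toList (fun c => c) false)
            (PySem.List.sorted str2.toList (fun c => c) false)

-- ===== PRECONDITION & SPEC =====
def Spec_is_sub_permutation (str1 : String) (str2 : String) (out : Bool) : Prop := out = is_sub_permutation_alt str1 str2
instance (str1 : String) (str2 : String) (out : Bool) : Decidable (Spec_is_sub_permutation str1 str2 out) := by unfold Spec_is_sub_permutation; infer_instance

-- ===== CLAIM (what is proved, stated in full; the proofs are below) =====
def Claim_equal_is_sub_permutation : Prop := ∀ (str1 : String) (str2 : String), Dom_is_sub_permutation str1 str2 → Spec_is_sub_permutation str1 str2 (is_sub_permutation str1 str2)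

-- ===== LEMMAS AND PROOFS =====

-- A's count loop passes iff every character of the scanned suffix has enough copies in l2
theorem pyALoop_eq_true_iff (l1 l2 : List Char) (cs : List Char) :
    pyALoop l1 l2 cs = true ↔ ∀ c ∈ cs, l1.count c ≤ l2.count c := by
  induction cs with
  | nil => simp [pyALoop]
  | cons c cs ih =>
    simp only [pyALoop]
    split_ifs with h
    · simp only [false_iff, not_forall]
      exact ⟨c, List.mem_cons_self, by omega⟩
    · rw [ih, List.forall_mem_cons]
      exact ⟨fun h2 => ⟨by omega, h2⟩, fun h2 => h2.2⟩

-- B's two-pointer scan is the greedy subsequence check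
theorem mergeLoop_eq_isSublist (xs ys : List Char) :
    mergeLoop xs ys = xs.isSublist ys := by
  induction ys generalizing xs with
  | nil => cases xs <;> simp [mergeLoop, List.isSublist]
  | cons d ds ih =>
    cases xs with
    | nil => simp [mergeLoop, List.isSublist]
    | cons c cs =>
      by_cases h : d = c
      · subst h
        simp [mergeLoop, List.isSublist, ih]
      · have hbeq : (c == d) = false := by
          simp [BEq.beq]
          exact fun he => absurd he.symm h
        simp [mergeLoop, List.isSublist, h, hbeq, ih]

-- both programs decide the same multiset-inclusion proposition
theorem is_sub_permutation_eq_true_iff (str1 str2 : String) :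
    is_sub_permutation str1 str2 = true ↔ List.Subperm str1.toList str2.toList := by
  unfold is_sub_permutation
  by_cases hlen : str1.toList.length > str2.toList.length
  · rw [if_pos hlen]
    simp only [Bool.false_eq_true, false_iff]
    exact fun hsp => absurd (List.Subperm.length_le hsp) (by omega)
  · rw [if_neg hlen, pyALoop_eq_true_iff]
    exact (List.subperm_ext_iff).symm

theorem is_sub_permutation_alt_eq_true_iff (str1 str2 : String) :
    is_sub_permutation_alt str1 str2 = true ↔ List.Subperm str1.toList str2.toList := by
  unfold is_sub_permutation_alt
  rw [mergeLoop_eq_isSublist, List.isSublist_iff_sublist]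
  have p1 := PySem.List.sorted_perm str1.toList (fun c => c) false
  have p2 := PySem.List.sorted_perm str2.toList (fun c => c) false
  constructor
  · intro hsub
    exact ((p1.symm.subperm).trans (List.Sublist.subperm hsub)).trans p2.subperm
  · intro hsp
    have hsp' : List.Subperm (PySem.List.sorted str1.toList (fun c => c) false)
        (PySem.List.sorted str2.toList (fun c => c) false) :=
      ((p1.subperm).trans hsp).trans p2.symm.subperm
    exact List.sublist_of_subperm_of_pairwise hsp'
      (PySem.List.sorted_pairwise str1.toList (fun c => c))
      (PySem.List.sorted_pairwise str2.toList (fun c => c))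

-- ===== VERDICT (by name: the statement is the Claim_ definition above) =====
theorem is_sub_permutation_spec : Claim_equal_is_sub_permutation := by
  intro str1 str2 _
  unfold Spec_is_sub_permutation
  rw [Bool.eq_iff_iff, is_sub_permutation_eq_true_iff, is_sub_permutation_alt_eq_true_iff]
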